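-- pv_equiv track=rewrite | github.com/bossjones/contextforge-cli | src/contextforge_cli/vendored/cursorfocus/project_detector.py | _detect_generic_project_type
-- ===== SOURCE A (Python) =====
-- def _detect_generic_project_type(files_set: set[str], all_files: set[str]) -> str:
--     """Detect if a generic project has any common development patterns.
--
--     Args:
--         files_set: Set of files in the root directory
--         all_files: Set of all files in the project (including subdirectories)
--
--     Returns:
--         str: 'generic_dev' if development patterns are found, 'generic' otherwise
--
--     Note:
--         Checks for common development indicators like:
--         - Documentation files
--         - Version control
--         - Test directories
--         - Configuration files
--         - Build artifacts
--     """
--     dev_indicators = {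
--         "docs": ["README.md", "CONTRIBUTING.md", "docs/", "documentation/"],
--         "vcs": [".git/", ".svn/", ".hg/"],
--         "tests": ["test/", "tests/", "spec/", "specs/"],
--         "config": [".env", "config/", "settings/"],
--         "build": ["build/", "dist/", "target/"],
--     }
--
--     matched_categories = set()
--
--     for category, indicators in dev_indicators.items():
--         if any(
--             ind in files_set or any(f.startswith(ind) for f in all_files)
--             for ind in indicators
--         ):
--             matched_categories.add(category)
--
--     return "generic_dev" if matched_categories else "generic"
-- ===== SOURCE B (Python) =====
-- _INDICATORS = [
--     "README.md", "CONTRIBUTING.md", "docs/", "documentation/",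
--     ".git/", ".svn/", ".hg/",
--     "test/", "tests/", "spec/", "specs/",
--     ".env", "config/", "settings/",
--     "build/", "dist/", "target/",
-- ]
--
--
-- def _build_trie():
--     root = {None: False}
--     for ind in _INDICATORS:
--         node = root
--         for ch in ind:
--             node = node.setdefault(ch, {None: False})
--         node[None] = True
--     return root
--
--
-- _TRIE = _build_trie()
--
--
-- def _detect_generic_project_type(files_set, all_files):
--     """Trie-based: build a prefix trie of the indicators once; a root-dir file
--     matches if its full walk ends at a terminal node, a project file matches
--     if its walk passes through any terminal node."""
--     for f in files_set:
--         node = _TRIE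
--         for ch in f:
--             node = node.get(ch)
--             if node is None:
--                 break
--         else:
--             if node[None]:
--                 return "generic_dev"
--     for f in all_files:
--         node = _TRIE
--         if node[None]:
--             return "generic_dev"
--         for ch in f:
--             node = node.get(ch)
--             if node is None:
--                 break
--             if node[None]:
--                 return "generic_dev"
--     return "generic"
-- ===== Notes on version B (the rewrite author's own statement) =====
-- stated objective: faster
-- what changed: B builds a prefix trie of all 17 indicator strings once and classifies each file by a single trie walk (full walk ending at a terminal node = exact match for files_set; passing through any terminal node = prefix match for all_files), replacing A's per-category loop that tests every indicator against every file and accumulates matched_categories.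
import Mathlib
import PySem

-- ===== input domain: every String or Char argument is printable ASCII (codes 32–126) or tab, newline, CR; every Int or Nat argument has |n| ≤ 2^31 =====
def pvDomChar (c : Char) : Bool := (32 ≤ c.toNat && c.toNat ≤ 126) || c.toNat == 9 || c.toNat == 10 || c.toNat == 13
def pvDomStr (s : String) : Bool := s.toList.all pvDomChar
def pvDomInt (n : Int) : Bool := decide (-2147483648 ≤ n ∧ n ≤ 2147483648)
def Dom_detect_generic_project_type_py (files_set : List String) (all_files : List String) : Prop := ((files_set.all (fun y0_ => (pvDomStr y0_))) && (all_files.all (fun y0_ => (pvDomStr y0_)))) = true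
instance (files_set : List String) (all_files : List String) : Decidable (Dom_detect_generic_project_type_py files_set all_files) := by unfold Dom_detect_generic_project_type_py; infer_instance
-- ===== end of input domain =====

-- B replaces A's per-category indicator scans by a prefix trie built once from all
-- indicators: each file is classified by a single trie walk (alternative algorithm).


-- ===== PORT A =====
-- the dict literal dev_indicators, in insertion order
def pvDevIndicators : List (String × List String) :=
  [("docs", ["README.md", "CONTRIBUTING.md", "docs/", "documentation/"]),
   ("vcs", [".git/", ".svn/", ".hg/"]),
   ("tests", ["test/", "tests/", "spec/", "specs/"]),
   ("config", [".env", "config/", "settings/"]),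
   ("build", ["build/", "dist/", "target/"])]

def detect_generic_project_type_py (files_set : List String) (all_files : List String) : String :=
  let matched_categories : PySem.Set String :=
    pvDevIndicators.foldl
      (fun acc ci =>
        if ci.2.any (fun ind =>
            files_set.contains ind || all_files.any (fun f => PySem.Str.startswith f ind)) then
          PySem.Set.add acc ci.1
        else acc)
      PySem.Set.empty
  if !matched_categories.isEmpty then "generic_dev" else "generic"

-- ===== PORT B =====
-- the flat _INDICATORS list
def pvIndicators : List String :=
  ["README.md", "CONTRIBUTING.md", "docs/", "documentation/",
   ".git/", ".svn/", ".hg/",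
   "test/", "tests/", "spec/", "specs/",
   ".env", "config/", "settings/",
   "build/", "dist/", "target/"]

-- a prefix trie: terminal flag + child list (mutual pair, not a nested inductive)
mutual
inductive PvTrie : Type
  | mk : Bool → PvKids → PvTrie
inductive PvKids : Type
  | nil : PvKids
  | cons : Char → PvTrie → PvKids → PvKids
end

def pvKidsFind : PvKids → Char → Option PvTrie
  | .nil, _ => none
  | .cons c t rest, c' => if c' = c then some t else pvKidsFind rest c'

def pvKidsSet : PvKids → Char → PvTrie → PvKids
  | .nil, c, t => .cons c t .nil
  | .cons c0 t0 rest, c, t =>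
      if c = c0 then .cons c0 t rest else .cons c0 t0 (pvKidsSet rest c t)

-- node.setdefault walk + final terminal mark, as one recursion over the word
def pvInsert : PvTrie → List Char → PvTrie
  | .mk _ k, [] => .mk true k
  | .mk t k, c :: cs =>
      .mk t (pvKidsSet k c (pvInsert ((pvKidsFind k c).getD (.mk false .nil)) cs))

-- _build_trie: insert every indicator into the empty trie
def pvTrie : PvTrie := pvIndicators.foldl (fun tr s => pvInsert tr s.toList) (.mk false .nil)

-- the files_set walk: full walk ends at a terminal node
def pvExact : PvTrie → List Char → Bool
  | .mk t _, [] => t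
  | .mk _ k, c :: cs =>
      match pvKidsFind k c with
      | none => false
      | some t' => pvExact t' cs

-- the all_files walk: some node on the walk is terminal
def pvPref : PvTrie → List Char → Bool
  | .mk t _, [] => t
  | .mk t k, c :: cs =>
      t || (match pvKidsFind k c with
            | none => false
            | some t' => pvPref t' cs)

def detect_generic_project_type_py_alt (files_set : List String) (all_files : List String) : String :=
  if files_set.any (fun f => pvExact pvTrie f.toList) then "generic_dev"
  else if all_files.any (fun f => pvPref pvTrie f.toList) then "generic_dev"
  else "generic"

-- ===== PRECONDITION & SPEC =====
def Spec_detect_generic_project_type_py (files_set : List String) (all_files : List String) (out : String) : Prop := out = detect_generic_project_type_py_alt files_set all_files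
instance (files_set : List String) (all_files : List String) (out : String) : Decidable (Spec_detect_generic_project_type_py files_set all_files out) := by unfold Spec_detect_generic_project_type_py; infer_instance

-- ===== CLAIM =====
def Claim_equal_detect_generic_project_type_py : Prop := ∀ (files_set : List String) (all_files : List String), Dom_detect_generic_project_type_py files_set all_files → Spec_detect_generic_project_type_py files_set all_files (detect_generic_project_type_py files_set all_files)

-- ===== LEMMAS AND PROOFS =====

theorem pv_exact_empty (cs : List Char) : pvExact (.mk false .nil) cs = false := by
  cases cs <;> simp [pvExact, pvKidsFind]

theorem pv_pref_empty (cs : List Char) : pvPref (.mk false .nil) cs = false := by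
  cases cs <;> simp [pvPref, pvKidsFind]

theorem pv_kidsFind_set : (k : PvKids) → (c c' : Char) → (t : PvTrie) →
    pvKidsFind (pvKidsSet k c t) c' = if c' = c then some t else pvKidsFind k c'
  | .nil, c, c', t => by simp [pvKidsSet, pvKidsFind]
  | .cons c0 t0 rest, c, c', t => by
      by_cases h : c = c0
      · subst h; by_cases h' : c' = c <;> simp [pvKidsSet, pvKidsFind, h']
      · by_cases h' : c' = c0
        · subst h'
          have hne : ¬ c' = c := fun hh => h hh.symm
          simp [pvKidsSet, h, pvKidsFind, hne]
        · simp [pvKidsSet, h, pvKidsFind, h', pv_kidsFind_set rest]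

theorem pv_exact_insert (l cs : List Char) (tr : PvTrie) :
    pvExact (pvInsert tr l) cs = (decide (cs = l) || pvExact tr cs) := by
  induction l generalizing tr cs with
  | nil =>
      obtain ⟨t, k⟩ := tr
      cases cs <;> simp [pvInsert, pvExact]
  | cons c ls ih =>
      obtain ⟨t, k⟩ := tr
      cases cs with
      | nil => simp [pvInsert, pvExact]
      | cons c' cs' =>
          simp only [pvInsert, pvExact, pv_kidsFind_set]
          by_cases h : c' = c
          · subst h
            cases hf : pvKidsFind k c' with
            | none => simp [ih, pv_exact_empty]
            | some t0 => simp [ih]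
          · simp [h]

theorem pv_pref_insert (l cs : List Char) (tr : PvTrie) :
    pvPref (pvInsert tr l) cs = (l.isPrefixOf cs || pvPref tr cs) := by
  induction l generalizing tr cs with
  | nil =>
      obtain ⟨t, k⟩ := tr
      cases cs <;> simp [pvInsert, pvPref, List.isPrefixOf]
  | cons c ls ih =>
      obtain ⟨t, k⟩ := tr
      cases cs with
      | nil => simp [pvInsert, pvPref, List.isPrefixOf]
      | cons c' cs' =>
          simp only [pvInsert, pvPref, pv_kidsFind_set, List.isPrefixOf]
          by_cases h : c' = c
          · subst h
            cases hf : pvKidsFind k c' with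
            | none =>
                simp [ih, pv_pref_empty, Bool.or_comm]
            | some t0 => simp [ih, Bool.or_left_comm]
          · have h2 : (c == c') = false := by simp [Ne.symm h]
            simp [h, h2]

theorem pv_exact_build (L : List String) (tr : PvTrie) (cs : List Char) :
    pvExact (L.foldl (fun t s => pvInsert t s.toList) tr) cs
      = (L.any (fun s => decide (cs = s.toList)) || pvExact tr cs) := by
  induction L generalizing tr with
  | nil => simp
  | cons s L ih => simp [List.foldl_cons, ih, pv_exact_insert, Bool.or_comm, Bool.or_assoc]

theorem pv_pref_build (L : List String) (tr : PvTrie) (cs : List Char) :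
    pvPref (L.foldl (fun t s => pvInsert t s.toList) tr) cs
      = (L.any (fun s => s.toList.isPrefixOf cs) || pvPref tr cs) := by
  induction L generalizing tr with
  | nil => simp
  | cons s L ih => simp [List.foldl_cons, ih, pv_pref_insert, Bool.or_comm, Bool.or_assoc]

theorem pv_exact_char (f : String) :
    pvExact pvTrie f.toList = pvIndicators.contains f := by
  rw [pvTrie, pv_exact_build, pv_exact_empty, Bool.or_false]
  rw [Bool.eq_iff_iff]
  simp only [List.any_eq_true, decide_eq_true_eq, List.contains_iff_mem]
  constructor
  · rintro ⟨s, hs, h⟩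
    have : f = s := String.ext (by simpa using h)
    exact this ▸ hs
  · intro hf; exact ⟨f, hf, rfl⟩

theorem pv_pref_char (f : String) :
    pvPref pvTrie f.toList = pvIndicators.any (fun ind => PySem.Str.startswith f ind) := by
  rw [pvTrie, pv_pref_build, pv_pref_empty, Bool.or_false]
  rw [Bool.eq_iff_iff]
  simp only [List.any_eq_true]
  constructor
  · rintro ⟨s, hs, h⟩
    refine ⟨s, hs, ?_⟩
    simp only [PySem.Str.startswith_eq]
    exact (PySem.Chars.startswith_iff _ _).mpr (List.isPrefixOf_iff_prefix.mp h)
  · rintro ⟨s, hs, h⟩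
    refine ⟨s, hs, ?_⟩
    simp only [PySem.Str.startswith_eq] at h
    exact List.isPrefixOf_iff_prefix.mpr ((PySem.Chars.startswith_iff _ _).mp h)

-- adding to a set never empties it
theorem pv_add_isEmpty {s : PySem.Set String} {x : String} :
    (PySem.Set.add s x).isEmpty = false := by
  unfold PySem.Set.add
  split
  · rename_i h
    simp only [List.isEmpty_eq_false_iff, ne_eq]
    rintro rfl; simp at h
  · simp

-- A's accumulation loop: the matched set is empty iff the start set was and no category fires
theorem pv_foldl_isEmpty (l : List (String × List String))
    (p : String × List String → Bool) (acc : PySem.Set String) :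
    (l.foldl (fun acc ci => if p ci then PySem.Set.add acc ci.1 else acc) acc).isEmpty
      = (acc.isEmpty && !l.any p) := by
  induction l generalizing acc with
  | nil => simp
  | cons hd tl ih =>
    by_cases h : p hd = true
    · simp [List.foldl_cons, h, ih, pv_add_isEmpty]
    · simp only [Bool.not_eq_true] at h
      simp [List.foldl_cons, h, ih]

theorem pv_any_or (l : List String) (p q : String → Bool) :
    (l.any fun a => p a || q a) = (l.any p || l.any q) := by
  induction l with
  | nil => simp
  | cons hd tl ih => simp [List.any_cons, ih]; cases p hd <;> cases q hd <;> simp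

theorem pv_any_swap (l m : List String) (r : String → String → Bool) :
    (l.any fun a => m.any fun b => r a b) = (m.any fun b => l.any fun a => r a b) := by
  rw [Bool.eq_iff_iff]
  simp only [List.any_eq_true]
  constructor
  · rintro ⟨a, ha, b, hb, h⟩; exact ⟨b, hb, a, ha, h⟩
  · rintro ⟨b, hb, a, ha, h⟩; exact ⟨a, ha, b, hb, h⟩

theorem pv_contains_swap (l m : List String) :
    (l.any fun a => m.contains a) = (m.any fun b => l.contains b) := by
  rw [Bool.eq_iff_iff]
  simp only [List.any_eq_true, List.contains_iff_mem]
  constructor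
  · rintro ⟨a, ha, hm⟩; exact ⟨a, hm, ha⟩
  · rintro ⟨b, hb, hl⟩; exact ⟨b, hl, hb⟩

theorem pv_flat_eq : pvDevIndicators.flatMap (·.2) = pvIndicators := by decide

theorem pv_cond (fs af : List String) :
    (pvDevIndicators.any fun ci =>
        ci.2.any fun ind => fs.contains ind || af.any fun f => PySem.Str.startswith f ind)
      = ((fs.any fun f => pvExact pvTrie f.toList)
          || af.any fun f => pvPref pvTrie f.toList) := by
  rw [← List.any_flatMap, pv_flat_eq, pv_any_or,
      pv_contains_swap pvIndicators fs, pv_any_swap pvIndicators af]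
  simp only [pv_exact_char, pv_pref_char]

theorem pv_main (files_set all_files : List String) :
    detect_generic_project_type_py files_set all_files
      = detect_generic_project_type_py_alt files_set all_files := by
  simp only [detect_generic_project_type_py, detect_generic_project_type_py_alt]
  rw [pv_foldl_isEmpty]
  simp only [PySem.Set.empty, List.isEmpty_nil, Bool.true_and, Bool.not_not, pv_cond]
  cases h1 : files_set.any fun f => pvExact pvTrie f.toList <;>
    cases h2 : all_files.any fun f => pvPref pvTrie f.toList <;> simp_all

-- ===== VERDICT =====
theorem detect_generic_project_type_py_spec : Claim_equal_detect_generic_project_type_py := by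
  intro fs af _
  exact pv_main fs af
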